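-- pv_equiv track=rewrite | github.com/mdillondc/terminal-ai | src/document_processor.py | _parse_email_content
-- ===== SOURCE A (Python) =====
-- def _parse_email_content(content: str) -> str:
--     """Parse email content and extract only text parts, skipping attachments"""
--     lines = content.split('\n')
--     result_lines = []
--
--     # Extract headers until we find the first empty line
--     header_section = True
--     boundary = None
--     current_section_type = None
--     skip_current_section = False
--
--     for line in lines:
--         if header_section:
--             if line.strip() == '':
--                 header_section = False
--                 result_lines.append(line)
--                 continue
--
--             # Extract boundary from Content-Type header
--             if line.startswith('Content-Type:') and 'boundary=' in line:
--                 boundary_start = line.find('boundary=') + 9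
--                 boundary_end = line.find(';', boundary_start)
--                 if boundary_end == -1:
--                     boundary_end = len(line)
--                 boundary = line[boundary_start:boundary_end].strip().strip('"')
--
--             result_lines.append(line)
--             continue
--
--         # If we have a boundary, check for MIME parts
--         if boundary and line.startswith('--' + boundary):
--             # Reset section state
--             current_section_type = None
--             skip_current_section = False
--             result_lines.append(line)
--             continue
--
--         # Check content headers within MIME parts
--         if line.startswith('Content-Type:'):
--             current_section_type = line.lower()
--             result_lines.append(line)
--             continue
--
--         if line.startswith('Content-Transfer-Encoding:'):
--             if 'base64' in line.lower():
--                 skip_current_section = True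
--             result_lines.append(line)
--             continue
--
--         # Skip base64 encoded content (attachments)
--         if skip_current_section and line.strip() and not line.startswith('Content-') and not line.startswith('--'):
--             # This is likely base64 content, skip it
--             continue
--
--         # Include all other content
--         result_lines.append(line)
--
--     return '\n'.join(result_lines)
-- ===== SOURCE B (Python) =====
-- def _parse_email_content(content: str) -> str:
--     """Parse email content and extract only text parts, skipping attachments.
--
--     Different decomposition: split header block from body at the first blank line,
--     read the boundary from the header block, cut the body into boundary-delimited
--     segments, and process each segment independently (prefix up to its first
--     base64 Content-Transfer-Encoding header kept, remainder filtered)."""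
--     lines = content.split('\n')
--     sep = next((i for i, l in enumerate(lines) if l.strip() == ''), None)
--     if sep is None:
--         return '\n'.join(lines)
--     header, body = lines[:sep + 1], lines[sep + 1:]
--     boundary = None
--     for l in lines[:sep]:
--         if l.startswith('Content-Type:') and 'boundary=' in l:
--             bs = l.find('boundary=') + 9
--             be = l.find(';', bs)
--             if be == -1:
--                 be = len(l)
--             boundary = l[bs:be].strip().strip('"')
--     if boundary:
--         marker = '--' + boundary
--         segs = []
--         cur = []
--         for l in body:
--             if l.startswith(marker):
--                 segs.append(cur)
--                 cur = [l]
--             else: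
--                 cur.append(l)
--         segs.append(cur)
--     else:
--         segs = [body]
--     out = header[:]
--     for seg in segs:
--         k = next((i for i, l in enumerate(seg)
--                   if l.startswith('Content-Transfer-Encoding:') and 'base64' in l.lower()), None)
--         if k is None:
--             out.extend(seg)
--         else:
--             out.extend(seg[:k + 1])
--             out.extend(l for l in seg[k + 1:]
--                        if l.strip() == '' or l.startswith('Content-') or l.startswith('--'))
--     return '\n'.join(out)
-- ===== Notes on version B (the rewrite author's own statement) =====
-- stated objective: alternative
-- what changed: A's single pass with four mutable state variables is replaced by a phase decomposition: split the text at the first blank line into header and body, fold the boundary out of the header lines, cut the body into boundary-delimited segments, and process each segment independently by locating its first base64 Content-Transfer-Encoding header and filtering only the lines after it.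
import Mathlib
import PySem

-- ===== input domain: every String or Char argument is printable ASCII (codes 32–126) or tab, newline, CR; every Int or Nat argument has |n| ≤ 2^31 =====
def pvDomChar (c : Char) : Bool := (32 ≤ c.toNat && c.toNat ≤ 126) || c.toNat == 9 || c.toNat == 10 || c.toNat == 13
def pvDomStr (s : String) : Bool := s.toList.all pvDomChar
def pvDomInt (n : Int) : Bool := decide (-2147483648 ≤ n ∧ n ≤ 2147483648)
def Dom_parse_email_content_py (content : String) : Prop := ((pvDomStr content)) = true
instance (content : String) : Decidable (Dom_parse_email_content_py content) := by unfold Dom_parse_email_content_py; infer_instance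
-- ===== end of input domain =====

-- B restructures A's single state machine into header/body split + per-segment processing (objective: alternative decomposition).

-- ===== PORT A =====
-- shared helper: the boundary-extraction expression both Python versions contain verbatim
def pvBoundaryOf (line : String) : Option String :=
  if PySem.Str.startswith line "Content-Type:" && PySem.Str.isIn "boundary=" line then
    let bs : Int := PySem.Str.find line "boundary=" + 9
    let be : Int := PySem.Str.findFrom line ";" bs
    let be : Int := if be == -1 then PySem.Str.len line else be
    some (PySem.Str.stripChars (PySem.Str.strip (PySem.Str.slice line (some bs) (some be))) "\"")
  else none

-- 'boundary and line.startswith("--" + boundary)' (None / '' are falsy)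
def pvMarker (bd : Option String) (line : String) : Bool :=
  match bd with
  | some b => !(b == "") && PySem.Str.startswith line ("--" ++ b)
  | none => false

-- the single for-loop of A, with its four state variables
def pvALoop (hdr : Bool) (bd : Option String) (cst : Option String) (skip : Bool) : List String → List String
  | [] => []
  | line :: rest =>
    if hdr then
      if PySem.Str.strip line == "" then
        line :: pvALoop false bd cst skip rest
      else
        line :: pvALoop true (match pvBoundaryOf line with | some b => some b | none => bd) cst skip rest
    else if pvMarker bd line then
      line :: pvALoop false bd none false rest
    else if PySem.Str.startswith line "Content-Type:" then
      line :: pvALoop false bd (some (PySem.Str.lower line)) skip rest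
    else if PySem.Str.startswith line "Content-Transfer-Encoding:" then
      line :: pvALoop false bd cst (if PySem.Str.isIn "base64" (PySem.Str.lower line) then true else skip) rest
    else if skip && !(PySem.Str.strip line == "") && !(PySem.Str.startswith line "Content-") && !(PySem.Str.startswith line "--") then
      pvALoop false bd cst skip rest
    else
      line :: pvALoop false bd cst skip rest

def parse_email_content_py (content : String) : String :=
  PySem.Str.join "\n" (pvALoop true none none false ((PySem.Str.split? content "\n").getD []))

-- ===== PORT B =====
def pvIsB64 (l : String) : Bool :=
  PySem.Str.startswith l "Content-Transfer-Encoding:" && PySem.Str.isIn "base64" (PySem.Str.lower l)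

def pvKeep (l : String) : Bool :=
  PySem.Str.strip l == "" || PySem.Str.startswith l "Content-" || PySem.Str.startswith l "--"

-- index of the first blank (whitespace-only) line, Source B's first next(...)
def pvFindSep : List String → Option Nat
  | [] => none
  | l :: ls => if PySem.Str.strip l == "" then some 0 else (pvFindSep ls).map (· + 1)

-- Source B's boundary loop body
def pvStep (acc : Option String) (l : String) : Option String :=
  match pvBoundaryOf l with
  | some b => some b
  | none => acc

-- Source B's segmentation loop (segments keep their leading marker line)
def pvSegSplit (marker : String) (body : List String) : List (List String) :=
  let st := body.foldl
    (fun (st : List (List String) × List String) l =>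
      if PySem.Str.startswith l marker then (st.1 ++ [st.2], [l]) else (st.1, st.2 ++ [l]))
    ([], [])
  st.1 ++ [st.2]

-- Source B's second next(...): index of the first base64 Content-Transfer-Encoding line
def pvFindB64 : List String → Option Nat
  | [] => none
  | l :: ls => if pvIsB64 l then some 0 else (pvFindB64 ls).map (· + 1)

-- per-segment processing: keep up to the first base64 CTE header, filter the rest
def pvProcSeg (seg : List String) : List String :=
  match pvFindB64 seg with
  | none => seg
  | some k => seg.take (k + 1) ++ (seg.drop (k + 1)).filter pvKeep

def parse_email_content_py_alt (content : String) : String :=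
  let lines := (PySem.Str.split? content "\n").getD []
  match pvFindSep lines with
  | none => PySem.Str.join "\n" lines
  | some sep =>
    let header := lines.take (sep + 1)
    let body := lines.drop (sep + 1)
    let bd := (lines.take sep).foldl pvStep none
    let segs : List (List String) :=
      match bd with
      | some b => if b == "" then [body] else pvSegSplit ("--" ++ b) body
      | none => [body]
    PySem.Str.join "\n" (header ++ (segs.map pvProcSeg).flatten)

-- ===== PRECONDITION & SPEC =====
def Spec_parse_email_content_py (content : String) (out : String) : Prop := out = parse_email_content_py_alt content
instance (content : String) (out : String) : Decidable (Spec_parse_email_content_py content out) := by unfold Spec_parse_email_content_py; infer_instance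

-- ===== CLAIM (what is proved, stated in full; the proofs are below) =====
def Claim_equal_parse_email_content_py : Prop := ∀ (content : String), Dom_parse_email_content_py content → Spec_parse_email_content_py content (parse_email_content_py content)

-- ===== LEMMAS AND PROOFS =====

-- proof-side: the body state machine restricted to one segment (marker handled outside)
def pvProcSegS : Bool → List String → List String
  | _, [] => []
  | true, l :: ls => if pvKeep l then l :: pvProcSegS true ls else pvProcSegS true ls
  | false, l :: ls => l :: pvProcSegS (pvIsB64 l) ls

-- proof-side recursive segment splitter
def pvSegRec (m : String) : List String → List String × List (List String)
  | [] => ([], [])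
  | l :: ls =>
    let r := pvSegRec m ls
    if PySem.Str.startswith l m then ([], (l :: r.1) :: r.2) else (l :: r.1, r.2)

-- prefix facts about the literal header strings
lemma pv_sw_trans (l p q : String) (h : q.toList <+: p.toList)
    (hp : PySem.Str.startswith l p = true) : PySem.Str.startswith l q = true := by
  simp only [PySem.Str.startswith_eq, PySem.Chars.startswith_iff] at hp ⊢
  exact h.trans hp

lemma pv_sw_excl (l p q : String) (hpq : ¬ p.toList <+: q.toList) (hqp : ¬ q.toList <+: p.toList)
    (hp : PySem.Str.startswith l p = true) : PySem.Str.startswith l q = false := by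
  have hp' : p.toList <+: l.toList := by
    simpa only [PySem.Str.startswith_eq, PySem.Chars.startswith_iff] using hp
  cases hq : PySem.Str.startswith l q with
  | false => rfl
  | true =>
    exfalso
    have hq' : q.toList <+: l.toList := by
      simpa only [PySem.Str.startswith_eq, PySem.Chars.startswith_iff] using hq
    rcases List.prefix_or_prefix_of_prefix hp' hq' with h1 | h1
    · exact hpq h1
    · exact hqp h1

lemma pv_ct_content (l : String) (h : PySem.Str.startswith l "Content-Type:" = true) :
    PySem.Str.startswith l "Content-" = true := pv_sw_trans l _ _ (by decide) h

lemma pv_cte_content (l : String) (h : PySem.Str.startswith l "Content-Transfer-Encoding:" = true) :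
    PySem.Str.startswith l "Content-" = true := pv_sw_trans l _ _ (by decide) h

lemma pv_ct_not_cte (l : String) (h : PySem.Str.startswith l "Content-Type:" = true) :
    PySem.Str.startswith l "Content-Transfer-Encoding:" = false :=
  pv_sw_excl l _ _ (by decide) (by decide) h

lemma pv_marker_dashes (l b : String) (h : PySem.Str.startswith l ("--" ++ b) = true) :
    PySem.Str.startswith l "--" = true := by
  refine pv_sw_trans l _ _ ?_ h
  simp [String.toList_append]

lemma pv_dashes_not_cte (l : String) (h : PySem.Str.startswith l "--" = true) :
    PySem.Str.startswith l "Content-Transfer-Encoding:" = false :=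
  pv_sw_excl l "--" "Content-Transfer-Encoding:" (by decide) (by decide) h

-- pvProcSegS with the flag already set is a plain filter
lemma pvProcSegS_true (ls : List String) : pvProcSegS true ls = ls.filter pvKeep := by
  induction ls with
  | nil => rfl
  | cons l ls ih => by_cases h : pvKeep l = true <;> simp [pvProcSegS, List.filter, h, ih]

-- B's per-segment routine computes the one-segment state machine
lemma pvProcSeg_eq (seg : List String) : pvProcSeg seg = pvProcSegS false seg := by
  induction seg with
  | nil => rfl
  | cons l ls ih =>
    by_cases h : pvIsB64 l = true
    · simp [pvProcSeg, pvFindB64, h, pvProcSegS, pvProcSegS_true]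
    · rw [Bool.not_eq_true] at h
      cases hf : pvFindB64 ls with
      | none =>
        simp [pvProcSeg, pvFindB64, h, hf, pvProcSegS, ← ih]
      | some k =>
        have h0 : pvProcSeg (l :: ls) = l :: pvProcSeg ls := by
          simp [pvProcSeg, pvFindB64, h, hf, List.take_succ_cons, List.drop_succ_cons]
        rw [h0, ih]
        simp [pvProcSegS, h]

-- A's body loop with no usable boundary is the one-segment machine
lemma pvALoop_nobd (bd : Option String) (hbd : ∀ l, pvMarker bd l = false) :
    ∀ (body : List String) (cst : Option String) (s : Bool),
      pvALoop false bd cst s body = pvProcSegS s body := by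
  intro body
  induction body with
  | nil => intro cst s; cases s <;> simp [pvALoop, pvProcSegS]
  | cons l ls ih =>
    intro cst s
    cases hct : PySem.Str.startswith l "Content-Type:" with
    | true =>
      have hne := pv_ct_not_cte l hct
      have hco := pv_ct_content l hct
      cases s with
      | false =>
        simp only [pvALoop, hbd l, hct, hne, pvProcSegS, pvIsB64, Bool.not_true, Bool.not_false, Bool.and_true, Bool.and_false, Bool.true_and, Bool.false_and, Bool.or_true, Bool.or_false, Bool.true_or, Bool.false_or, Bool.false_eq_true, Bool.true_eq_false, if_false, ite_self, reduceIte, List.cons_append, List.nil_append, List.append_assoc, List.singleton_append, List.append_nil, List.map_cons, List.map_nil, List.flatten_cons, List.flatten_nil]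
        rw [ih]
      | true =>
        simp only [pvALoop, hbd l, hct, hco, pvProcSegS, pvKeep, Bool.not_true, Bool.not_false, Bool.and_true, Bool.and_false, Bool.true_and, Bool.false_and, Bool.or_true, Bool.or_false, Bool.true_or, Bool.false_or, Bool.false_eq_true, Bool.true_eq_false, if_false, ite_self, reduceIte, List.cons_append, List.nil_append, List.append_assoc, List.singleton_append, List.append_nil, List.map_cons, List.map_nil, List.flatten_cons, List.flatten_nil]
        rw [ih]
    | false =>
      cases hcte : PySem.Str.startswith l "Content-Transfer-Encoding:" with
      | true =>
        have hco := pv_cte_content l hcte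
        cases s with
        | false =>
          simp only [pvALoop, hbd l, hct, hcte, pvProcSegS, pvIsB64, Bool.not_true, Bool.not_false, Bool.and_true, Bool.and_false, Bool.true_and, Bool.false_and, Bool.or_true, Bool.or_false, Bool.true_or, Bool.false_or, Bool.false_eq_true, Bool.true_eq_false, if_false, ite_self, reduceIte, List.cons_append, List.nil_append, List.append_assoc, List.singleton_append, List.append_nil, List.map_cons, List.map_nil, List.flatten_cons, List.flatten_nil]
          cases hb64 : PySem.Str.isIn "base64" (PySem.Str.lower l) <;>
            simp only [hb64, Bool.not_true, Bool.not_false, Bool.and_true, Bool.and_false, Bool.true_and, Bool.false_and, Bool.or_true, Bool.or_false, Bool.true_or, Bool.false_or, Bool.false_eq_true, Bool.true_eq_false, if_false, ite_self, reduceIte] <;> rw [ih]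
        | true =>
          simp only [pvALoop, hbd l, hct, hcte, hco, pvProcSegS, pvKeep, Bool.not_true, Bool.not_false, Bool.and_true, Bool.and_false, Bool.true_and, Bool.false_and, Bool.or_true, Bool.or_false, Bool.true_or, Bool.false_or, Bool.false_eq_true, Bool.true_eq_false, if_false, ite_self, reduceIte, List.cons_append, List.nil_append, List.append_assoc, List.singleton_append, List.append_nil, List.map_cons, List.map_nil, List.flatten_cons, List.flatten_nil]
          rw [ih]
      | false =>
        cases s with
        | false =>
          simp only [pvALoop, hbd l, hct, hcte, pvProcSegS, pvIsB64, Bool.not_true, Bool.not_false, Bool.and_true, Bool.and_false, Bool.true_and, Bool.false_and, Bool.or_true, Bool.or_false, Bool.true_or, Bool.false_or, Bool.false_eq_true, Bool.true_eq_false, if_false, ite_self, reduceIte, List.cons_append, List.nil_append, List.append_assoc, List.singleton_append, List.append_nil, List.map_cons, List.map_nil, List.flatten_cons, List.flatten_nil]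
          rw [ih]
        | true =>
          by_cases hk : pvKeep l = true
          · have hk' := hk
            simp only [pvKeep, Bool.or_eq_true] at hk'
            rcases hk' with (h | h) | h <;>
              simp only [pvALoop, hbd l, hct, hcte, h, hk, pvProcSegS, Bool.not_true, Bool.not_false, Bool.and_true, Bool.and_false, Bool.true_and, Bool.false_and, Bool.or_true, Bool.or_false, Bool.true_or, Bool.false_or, Bool.false_eq_true, Bool.true_eq_false, if_false, ite_self, reduceIte, List.cons_append, List.nil_append, List.append_assoc, List.singleton_append, List.append_nil, List.map_cons, List.map_nil, List.flatten_cons, List.flatten_nil] <;> rw [ih]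
          · rw [Bool.not_eq_true] at hk
            have hk' := hk
            simp only [pvKeep, Bool.or_eq_false_iff] at hk'
            obtain ⟨⟨h1, h2⟩, h3⟩ := hk'
            simp only [pvALoop, hbd l, hct, hcte, h1, h2, h3, hk, pvProcSegS, Bool.not_true, Bool.not_false, Bool.and_true, Bool.and_false, Bool.true_and, Bool.false_and, Bool.or_true, Bool.or_false, Bool.true_or, Bool.false_or, Bool.false_eq_true, Bool.true_eq_false, if_false, ite_self, reduceIte, List.cons_append, List.nil_append, List.append_assoc, List.singleton_append, List.append_nil, List.map_cons, List.map_nil, List.flatten_cons, List.flatten_nil]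
            rw [ih]

-- A's body loop with boundary b ≠ '' is segment-wise processing
lemma pvALoop_bd (b : String) (hb : (b == "") = false) :
    ∀ (body : List String) (cst : Option String) (s : Bool),
      pvALoop false (some b) cst s body =
        pvProcSegS s (pvSegRec ("--" ++ b) body).1
          ++ ((pvSegRec ("--" ++ b) body).2.map (pvProcSegS false)).flatten := by
  intro body
  induction body with
  | nil => intro cst s; cases s <;> simp [pvALoop, pvProcSegS, pvSegRec]
  | cons l ls ih =>
    intro cst s
    have hmk : pvMarker (some b) l = PySem.Str.startswith l ("--" ++ b) := by
      simp only [pvMarker, hb, Bool.not_false, Bool.true_and]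
    cases hm : PySem.Str.startswith l ("--" ++ b) with
    | true =>
      have hb64 : pvIsB64 l = false := by
        simp only [pvIsB64, pv_dashes_not_cte l (pv_marker_dashes l b hm), Bool.false_and]
      cases s <;>
        (simp only [pvALoop, hmk, hm, pvSegRec, pvProcSegS, hb64, Bool.not_true, Bool.not_false, Bool.and_true, Bool.and_false, Bool.true_and, Bool.false_and, Bool.or_true, Bool.or_false, Bool.true_or, Bool.false_or, Bool.false_eq_true, Bool.true_eq_false, if_false, ite_self, reduceIte, List.cons_append, List.nil_append, List.append_assoc, List.singleton_append, List.append_nil, List.map_cons, List.map_nil, List.flatten_cons, List.flatten_nil]; rw [ih])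
    | false =>
      cases hct : PySem.Str.startswith l "Content-Type:" with
      | true =>
        have hne := pv_ct_not_cte l hct
        have hco := pv_ct_content l hct
        cases s with
        | false =>
          simp only [pvALoop, hmk, hm, pvSegRec, hct, hne, pvProcSegS, pvIsB64, Bool.not_true, Bool.not_false, Bool.and_true, Bool.and_false, Bool.true_and, Bool.false_and, Bool.or_true, Bool.or_false, Bool.true_or, Bool.false_or, Bool.false_eq_true, Bool.true_eq_false, if_false, ite_self, reduceIte, List.cons_append, List.nil_append, List.append_assoc, List.singleton_append, List.append_nil, List.map_cons, List.map_nil, List.flatten_cons, List.flatten_nil]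
          rw [ih]
        | true =>
          simp only [pvALoop, hmk, hm, pvSegRec, hct, hco, pvProcSegS, pvKeep, Bool.not_true, Bool.not_false, Bool.and_true, Bool.and_false, Bool.true_and, Bool.false_and, Bool.or_true, Bool.or_false, Bool.true_or, Bool.false_or, Bool.false_eq_true, Bool.true_eq_false, if_false, ite_self, reduceIte, List.cons_append, List.nil_append, List.append_assoc, List.singleton_append, List.append_nil, List.map_cons, List.map_nil, List.flatten_cons, List.flatten_nil]
          rw [ih]
      | false =>
        cases hcte : PySem.Str.startswith l "Content-Transfer-Encoding:" with
        | true =>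
          have hco := pv_cte_content l hcte
          cases s with
          | false =>
            simp only [pvALoop, hmk, hm, pvSegRec, hct, hcte, pvProcSegS, pvIsB64, Bool.not_true, Bool.not_false, Bool.and_true, Bool.and_false, Bool.true_and, Bool.false_and, Bool.or_true, Bool.or_false, Bool.true_or, Bool.false_or, Bool.false_eq_true, Bool.true_eq_false, if_false, ite_self, reduceIte, List.cons_append, List.nil_append, List.append_assoc, List.singleton_append, List.append_nil, List.map_cons, List.map_nil, List.flatten_cons, List.flatten_nil]
            cases hb64 : PySem.Str.isIn "base64" (PySem.Str.lower l) <;>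
              simp only [hb64, Bool.not_true, Bool.not_false, Bool.and_true, Bool.and_false, Bool.true_and, Bool.false_and, Bool.or_true, Bool.or_false, Bool.true_or, Bool.false_or, Bool.false_eq_true, Bool.true_eq_false, if_false, ite_self, reduceIte] <;> rw [ih]
          | true =>
            simp only [pvALoop, hmk, hm, pvSegRec, hct, hcte, hco, pvProcSegS, pvKeep, Bool.not_true, Bool.not_false, Bool.and_true, Bool.and_false, Bool.true_and, Bool.false_and, Bool.or_true, Bool.or_false, Bool.true_or, Bool.false_or, Bool.false_eq_true, Bool.true_eq_false, if_false, ite_self, reduceIte, List.cons_append, List.nil_append, List.append_assoc, List.singleton_append, List.append_nil, List.map_cons, List.map_nil, List.flatten_cons, List.flatten_nil]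
            rw [ih]
        | false =>
          cases s with
          | false =>
            simp only [pvALoop, hmk, hm, pvSegRec, hct, hcte, pvProcSegS, pvIsB64, Bool.not_true, Bool.not_false, Bool.and_true, Bool.and_false, Bool.true_and, Bool.false_and, Bool.or_true, Bool.or_false, Bool.true_or, Bool.false_or, Bool.false_eq_true, Bool.true_eq_false, if_false, ite_self, reduceIte, List.cons_append, List.nil_append, List.append_assoc, List.singleton_append, List.append_nil, List.map_cons, List.map_nil, List.flatten_cons, List.flatten_nil]
            rw [ih]
          | true =>
            by_cases hk : pvKeep l = true
            · have hk' := hk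
              simp only [pvKeep, Bool.or_eq_true] at hk'
              rcases hk' with (h | h) | h <;>
                simp only [pvALoop, hmk, hm, pvSegRec, hct, hcte, h, hk, pvProcSegS, Bool.not_true, Bool.not_false, Bool.and_true, Bool.and_false, Bool.true_and, Bool.false_and, Bool.or_true, Bool.or_false, Bool.true_or, Bool.false_or, Bool.false_eq_true, Bool.true_eq_false, if_false, ite_self, reduceIte, List.cons_append, List.nil_append, List.append_assoc, List.singleton_append, List.append_nil, List.map_cons, List.map_nil, List.flatten_cons, List.flatten_nil] <;> rw [ih]
            · rw [Bool.not_eq_true] at hk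
              have hk' := hk
              simp only [pvKeep, Bool.or_eq_false_iff] at hk'
              obtain ⟨⟨h1, h2⟩, h3⟩ := hk'
              simp only [pvALoop, hmk, hm, pvSegRec, hct, hcte, h1, h2, h3, hk, pvProcSegS, Bool.not_true, Bool.not_false, Bool.and_true, Bool.and_false, Bool.true_and, Bool.false_and, Bool.or_true, Bool.or_false, Bool.true_or, Bool.false_or, Bool.false_eq_true, Bool.true_eq_false, if_false, ite_self, reduceIte, List.cons_append, List.nil_append, List.append_assoc, List.singleton_append, List.append_nil, List.map_cons, List.map_nil, List.flatten_cons, List.flatten_nil]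
              rw [ih]

-- B's fold-based splitter agrees with the recursive one
lemma pvSegFold (m : String) :
    ∀ (body : List String) (segs : List (List String)) (cur : List String),
      (body.foldl
        (fun (st : List (List String) × List String) l =>
          if PySem.Str.startswith l m then (st.1 ++ [st.2], [l]) else (st.1, st.2 ++ [l]))
        (segs, cur)).1
        ++ [(body.foldl
        (fun (st : List (List String) × List String) l =>
          if PySem.Str.startswith l m then (st.1 ++ [st.2], [l]) else (st.1, st.2 ++ [l]))
        (segs, cur)).2]
      = segs ++ (cur ++ (pvSegRec m body).1) :: (pvSegRec m body).2 := by
  intro body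
  induction body with
  | nil => intro segs cur; simp [pvSegRec]
  | cons l ls ih =>
    intro segs cur
    cases hm : PySem.Str.startswith l m with
    | true =>
      simp only [List.foldl_cons, hm, pvSegRec, Bool.not_true, Bool.not_false, Bool.and_true, Bool.and_false, Bool.true_and, Bool.false_and, Bool.or_true, Bool.or_false, Bool.true_or, Bool.false_or, Bool.false_eq_true, Bool.true_eq_false, if_false, ite_self, reduceIte, List.cons_append, List.nil_append, List.append_assoc, List.singleton_append, List.append_nil, List.map_cons, List.map_nil, List.flatten_cons, List.flatten_nil]
      rw [ih]
      simp only [List.cons_append, List.nil_append, List.append_assoc, List.singleton_append, List.append_nil, List.map_cons, List.map_nil, List.flatten_cons, List.flatten_nil]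
    | false =>
      simp only [List.foldl_cons, hm, pvSegRec, Bool.not_true, Bool.not_false, Bool.and_true, Bool.and_false, Bool.true_and, Bool.false_and, Bool.or_true, Bool.or_false, Bool.true_or, Bool.false_or, Bool.false_eq_true, Bool.true_eq_false, if_false, ite_self, reduceIte, List.cons_append, List.nil_append, List.append_assoc, List.singleton_append, List.append_nil, List.map_cons, List.map_nil, List.flatten_cons, List.flatten_nil]
      rw [ih]
      simp only [List.cons_append, List.nil_append, List.append_assoc, List.singleton_append, List.append_nil, List.map_cons, List.map_nil, List.flatten_cons, List.flatten_nil]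

lemma pvSegSplit_eq (m : String) (body : List String) :
    pvSegSplit m body = (pvSegRec m body).1 :: (pvSegRec m body).2 := by
  unfold pvSegSplit
  simpa using pvSegFold m body [] []

-- the header phase
lemma pvALoop_header :
    ∀ (lines : List String) (bd0 cst : Option String),
      pvALoop true bd0 cst false lines =
        match pvFindSep lines with
        | none => lines
        | some sep =>
          lines.take (sep + 1) ++
            pvALoop false ((lines.take sep).foldl pvStep bd0) cst false (lines.drop (sep + 1)) := by
  intro lines
  induction lines with
  | nil => intro bd0 cst; simp [pvALoop, pvFindSep]
  | cons l rest ih =>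
    intro bd0 cst
    cases h : (PySem.Str.strip l == "") with
    | true =>
      simp only [pvALoop, pvFindSep, h, Bool.not_true, Bool.not_false, Bool.and_true, Bool.and_false, Bool.true_and, Bool.false_and, Bool.or_true, Bool.or_false, Bool.true_or, Bool.false_or, Bool.false_eq_true, Bool.true_eq_false, if_false, ite_self, reduceIte, List.take_succ_cons, List.take_zero,
        List.drop_succ_cons, List.drop_zero, List.foldl_nil, List.cons_append, List.nil_append, List.append_assoc, List.singleton_append, List.append_nil, List.map_cons, List.map_nil, List.flatten_cons, List.flatten_nil]
    | false =>
      have hup : (match pvBoundaryOf l with | some b => some b | none => bd0) = pvStep bd0 l := by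
        cases hpb : pvBoundaryOf l <;> simp only [pvStep, hpb]
      cases hf : pvFindSep rest with
      | none =>
        have h0 := ih (pvStep bd0 l) cst
        rw [hf] at h0
        simp only [pvALoop, pvFindSep, h, hf, hup, h0, Option.map_none, Bool.not_true, Bool.not_false, Bool.and_true, Bool.and_false, Bool.true_and, Bool.false_and, Bool.or_true, Bool.or_false, Bool.true_or, Bool.false_or, Bool.false_eq_true, Bool.true_eq_false, if_false, ite_self, reduceIte, List.cons_append, List.nil_append, List.append_assoc, List.singleton_append, List.append_nil, List.map_cons, List.map_nil, List.flatten_cons, List.flatten_nil]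
      | some k =>
        have h0 := ih (pvStep bd0 l) cst
        rw [hf] at h0
        simp only [pvALoop, pvFindSep, h, hf, hup, h0, Option.map_some, Bool.not_true, Bool.not_false, Bool.and_true, Bool.and_false, Bool.true_and, Bool.false_and, Bool.or_true, Bool.or_false, Bool.true_or, Bool.false_or, Bool.false_eq_true, Bool.true_eq_false, if_false, ite_self, reduceIte,
          List.take_succ_cons, List.drop_succ_cons, List.foldl_cons, List.cons_append, List.nil_append, List.append_assoc, List.singleton_append, List.append_nil, List.map_cons, List.map_nil, List.flatten_cons, List.flatten_nil]

-- ===== VERDICT (by name: the statement is the Claim_ definition above) =====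
theorem parse_email_content_py_spec : Claim_equal_parse_email_content_py := by
  intro content _
  unfold Spec_parse_email_content_py parse_email_content_py parse_email_content_py_alt
  have hfun : pvProcSeg = pvProcSegS false := funext pvProcSeg_eq
  rw [pvALoop_header]
  cases hf : pvFindSep ((PySem.Str.split? content "\n").getD []) with
  | none => simp only [hf]
  | some sep =>
    simp only [hf]
    cases hbd : (((PySem.Str.split? content "\n").getD []).take sep).foldl pvStep none with
    | none =>
      rw [pvALoop_nobd none (fun _ => rfl), ← congrFun hfun]
      simp only [hbd, List.cons_append, List.nil_append, List.append_assoc, List.singleton_append, List.append_nil, List.map_cons, List.map_nil, List.flatten_cons, List.flatten_nil]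
    | some b =>
      cases hb : (b == "") with
      | true =>
        have hfalse : ∀ l, pvMarker (some b) l = false := fun l => by
          simp only [pvMarker, hb, Bool.not_true, Bool.false_and]
        rw [pvALoop_nobd (some b) hfalse, ← congrFun hfun]
        simp only [hbd, hb, Bool.not_true, Bool.not_false, Bool.and_true, Bool.and_false, Bool.true_and, Bool.false_and, Bool.or_true, Bool.or_false, Bool.true_or, Bool.false_or, Bool.false_eq_true, Bool.true_eq_false, if_false, ite_self, reduceIte, List.cons_append, List.nil_append, List.append_assoc, List.singleton_append, List.append_nil, List.map_cons, List.map_nil, List.flatten_cons, List.flatten_nil]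
      | false =>
        rw [pvALoop_bd b hb]
        simp only [hbd, hb, pvSegSplit_eq, hfun, Bool.not_true, Bool.not_false, Bool.and_true, Bool.and_false, Bool.true_and, Bool.false_and, Bool.or_true, Bool.or_false, Bool.true_or, Bool.false_or, Bool.false_eq_true, Bool.true_eq_false, if_false, ite_self, reduceIte, List.cons_append, List.nil_append, List.append_assoc, List.singleton_append, List.append_nil, List.map_cons, List.map_nil, List.flatten_cons, List.flatten_nil]
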